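-- pv_equiv track=rewrite | github.com/Jamie0115/leecode_python | jamie/practice/找出數字0連續出現最多的次數.py | Zerocount
-- ===== SOURCE A (Python) =====
-- def Zerocount(n):  # 先有function的架構
--     count = 0  # 一開始0出現的次數(初設為0)
--     max_count = 0  # 讓max_count隨時記錄最大值
--     while n > 0:  # 假設我的數字n大於零
--         d = n % 10  # 取得其個位數字
--         if d == 0:  # 若個位數字為0
--             count += 1  # 計數器count+1
--             max_count = max(max_count, count)  # 紀錄最多max_count的次數
--         else:
--             count = 0  # 如果個位數字不為0，計數器歸零
--         n = n // 10  # 這時候的經while計算的n在重新去除個位數字->得到新數n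
--     return max_count
-- ===== SOURCE B (Python) =====
-- def Zerocount(n):
--     # Build the list of zero-run lengths in the digit sequence (recursively),
--     # then return the largest run.
--     def runs(m, cur):
--         if m <= 0:
--             return [cur]
--         if m % 10 == 0:
--             return runs(m // 10, cur + 1)
--         return [cur] + runs(m // 10, 0)
--     return max(runs(n, 0))
-- ===== Notes on version B (the rewrite author's own statement) =====
-- stated objective: alternative
-- what changed: Replaces the imperative while loop that interleaves a running counter with a running max by a recursion that first builds the list of zero-run lengths of the digit sequence and then takes max() of that list.
import Mathlib
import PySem

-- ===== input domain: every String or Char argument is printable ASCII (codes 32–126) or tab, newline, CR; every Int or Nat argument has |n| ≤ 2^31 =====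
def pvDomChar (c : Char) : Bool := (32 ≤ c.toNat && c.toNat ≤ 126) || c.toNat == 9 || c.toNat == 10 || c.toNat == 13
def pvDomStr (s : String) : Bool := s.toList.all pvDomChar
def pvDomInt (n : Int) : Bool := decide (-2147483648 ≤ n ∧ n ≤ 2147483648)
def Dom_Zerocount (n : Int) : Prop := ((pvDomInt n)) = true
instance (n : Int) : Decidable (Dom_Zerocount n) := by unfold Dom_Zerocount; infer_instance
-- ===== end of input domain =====

-- B replaces A's interleaved counter/max while-loop by a recursion that first builds
-- the list of zero-run lengths of the digit sequence and then takes its maximum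
-- (alternative decomposition, same cost).


-- termination helper used by both ports' recursions (n // 10 shrinks for n > 0)
theorem pvFloordiv10_toNat_lt {n : Int} (h : 0 < n) :
    (PySem.Int.floordiv n 10).toNat < n.toNat := by
  rw [PySem.Int.floordiv_eq_ediv_of_pos (by norm_num)]
  omega

-- ===== PORT A =====
-- the while loop, carrying (n, count, max_count)
def ZerocountGo (n count max_count : Int) : Int :=
  if n > 0 then
    let d := PySem.Int.mod n 10
    if d = 0 then
      ZerocountGo (PySem.Int.floordiv n 10) (count + 1) (max max_count (count + 1))
    else
      ZerocountGo (PySem.Int.floordiv n 10) 0 max_count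
  else max_count
termination_by n.toNat
decreasing_by all_goals exact pvFloordiv10_toNat_lt (by omega)

def Zerocount (n : Int) : Int := ZerocountGo n 0 0

-- ===== PORT B =====
-- runs(m, cur): the list of zero-run lengths of m's digit sequence, cur being the current run
def ZerocountRuns (m cur : Int) : List Int :=
  if _h : m ≤ 0 then [cur]
  else if PySem.Int.mod m 10 = 0 then
    ZerocountRuns (PySem.Int.floordiv m 10) (cur + 1)
  else
    [cur] ++ ZerocountRuns (PySem.Int.floordiv m 10) 0
termination_by m.toNat
decreasing_by all_goals exact pvFloordiv10_toNat_lt (by omega)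

def Zerocount_alt (n : Int) : Int :=
  -- max(runs(n, 0)); the list is never empty, so Python's max never raises
  match PySem.List.max? (ZerocountRuns n 0) (fun x => x) with
  | some m => m
  | none => 0

-- ===== PRECONDITION & SPEC =====
def Spec_Zerocount (n : Int) (out : Int) : Prop := out = Zerocount_alt n
instance (n : Int) (out : Int) : Decidable (Spec_Zerocount n out) := by unfold Spec_Zerocount; infer_instance

-- ===== CLAIM (what is proved, stated in full; the proofs are below) =====
def Claim_equal_Zerocount : Prop := ∀ (n : Int), Dom_Zerocount n → Spec_Zerocount n (Zerocount n)

-- ===== LEMMAS AND PROOFS =====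

-- runs is nonempty and its head is at least the running count
theorem pvRuns_head : ∀ (k : Nat) (m cur : Int), m.toNat = k →
    ∃ x t, ZerocountRuns m cur = x :: t ∧ cur ≤ x := by
  intro k
  induction k using Nat.strong_induction_on with
  | _ k ih =>
    intro m cur hk
    rw [ZerocountRuns]
    split
    · exact ⟨cur, [], rfl, le_refl _⟩
    · rename_i hm
      split
      · obtain ⟨x, t, hx, hle⟩ :=
          ih _ (hk ▸ pvFloordiv10_toNat_lt (by omega)) (PySem.Int.floordiv m 10) (cur + 1) rfl
        exact ⟨x, t, hx, by omega⟩
      · exact ⟨cur, _, rfl, le_refl _⟩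

-- A's loop computes the fold of max over B's run-length list
theorem pvGo_eq : ∀ (k : Nat) (m cur maxc : Int), m.toNat = k →
    0 ≤ maxc → cur ≤ maxc →
    ZerocountGo m cur maxc = (ZerocountRuns m cur).foldl max maxc := by
  intro k
  induction k using Nat.strong_induction_on with
  | _ k ih =>
    intro m cur maxc hk h0 hcm
    rw [ZerocountGo, ZerocountRuns]
    by_cases hm : m > 0
    · simp only [hm, if_pos, dif_neg (by omega : ¬ m ≤ 0)]
      have hlt := hk ▸ pvFloordiv10_toNat_lt hm
      by_cases hd : PySem.Int.mod m 10 = 0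
      · simp only [hd, if_pos]
        obtain ⟨x, t, hx, hle⟩ := pvRuns_head _ (PySem.Int.floordiv m 10) (cur + 1) rfl
        rw [ih _ hlt _ _ _ rfl (by omega) (le_max_right _ _), hx]
        simp only [List.foldl]
        have : max (max maxc (cur + 1)) x = max maxc x := by omega
        rw [this]
      · simp only [hd, if_neg, not_false_iff]
        rw [ih _ hlt _ 0 _ rfl h0 h0]
        simp only [List.cons_append, List.nil_append, List.foldl]
        have : max maxc cur = maxc := by omega
        rw [this]
    · simp only [if_neg hm, dif_pos (by omega : m ≤ 0), List.foldl]
      omega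

-- ===== VERDICT (by name: the statement is the Claim_ definition above) =====
theorem Zerocount_spec : Claim_equal_Zerocount := by
  intro n _
  unfold Spec_Zerocount Zerocount Zerocount_alt
  obtain ⟨x, t, hx, hle⟩ := pvRuns_head n.toNat n 0 rfl
  rw [pvGo_eq n.toNat n 0 0 rfl (le_refl 0) (le_refl 0), hx,
    PySem.List.max?_id_cons]
  simp only [List.foldl]
  have : max 0 x = x := by omega
  rw [this]
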